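-- pv_equiv track=rewrite | github.com/mirandasong24/cs3245-hw4 | search.py | find_title_and_content_docIDs_for_two_way_merge
-- ===== SOURCE A (Python) =====
-- def find_title_and_content_docIDs_for_two_way_merge(lst1, lst2):
--     common_title_docIDs = []
--     common_content_docIDs = []
--     filtered_lists = filter_two_lists_by_common_docIDs(lst1, lst2)
--     modified_lst1 = filtered_lists[0]
--     modified_lst2 = filtered_lists[1]
--     for item1, item2 in zip(modified_lst1, modified_lst2):
--         merged_title_lst = []
--         merged_content_lst = []
--
--         if item1[2] != None and item2[2] != None:
--             merged_title_lst = merge_two_positional_lists(item1[2], item2[2])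
--         if item1[3] != None and item2[3] != None:
--             merged_content_lst = merge_two_positional_lists(item1[3], item2[3])
--
--         if merged_title_lst != []:
--             common_title_docIDs.append(item1[0])
--         if merged_content_lst != []:
--             common_content_docIDs.append(item1[0])
--
--     return [common_title_docIDs, common_content_docIDs]
--
-- def filter_two_lists_by_common_docIDs(lst1, lst2):
--     modified_lst1 = []
--     modified_lst2 = []
--     for item1 in lst1:
--         for item2 in lst2:
--             if item1[0] == item2[0]:  # Assuming docID is type int
--                 modified_lst1.append(item1)
--                 modified_lst2.append(item2)
--     return [modified_lst1, modified_lst2]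
--
-- def merge_two_positional_lists(lst1, lst2):
--     result = []
--     for item1 in lst1:
--         for item2 in lst2:
--             if item2 == item1 + 1:      # If the positional index in lst2 is exactly one after a positional index
--                 result.append(item2)    # in lst1, then add the second positional index to the result list
--     return result
-- ===== SOURCE B (Python) =====
-- def find_title_and_content_docIDs_for_two_way_merge(lst1, lst2):
--     # Index lst2 items by docID once, and test adjacency with a position set:
--     # removes both quadratic scans of A (docID pairing and positional merge).
--     index = {}
--     for item in lst2:
--         index.setdefault(item[0], []).append(item)
--     common_title_docIDs = []
--     common_content_docIDs = []
--     for item1 in lst1: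
--         for item2 in index.get(item1[0], []):
--             if item1[2] is not None and item2[2] is not None:
--                 positions = set(item2[2])
--                 if any(p + 1 in positions for p in item1[2]):
--                     common_title_docIDs.append(item1[0])
--             if item1[3] is not None and item2[3] is not None:
--                 positions = set(item2[3])
--                 if any(p + 1 in positions for p in item1[3]):
--                     common_content_docIDs.append(item1[0])
--     return [common_title_docIDs, common_content_docIDs]
-- ===== Notes on version B (the rewrite author's own statement) =====
-- stated objective: faster
-- what changed: Replaced the quadratic nested docID-pairing scan with a one-pass dict index of lst2 keyed by docID, and the quadratic positional merge with a set of positions plus an any() existence test (only non-emptiness of the merge is used).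
import Mathlib
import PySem

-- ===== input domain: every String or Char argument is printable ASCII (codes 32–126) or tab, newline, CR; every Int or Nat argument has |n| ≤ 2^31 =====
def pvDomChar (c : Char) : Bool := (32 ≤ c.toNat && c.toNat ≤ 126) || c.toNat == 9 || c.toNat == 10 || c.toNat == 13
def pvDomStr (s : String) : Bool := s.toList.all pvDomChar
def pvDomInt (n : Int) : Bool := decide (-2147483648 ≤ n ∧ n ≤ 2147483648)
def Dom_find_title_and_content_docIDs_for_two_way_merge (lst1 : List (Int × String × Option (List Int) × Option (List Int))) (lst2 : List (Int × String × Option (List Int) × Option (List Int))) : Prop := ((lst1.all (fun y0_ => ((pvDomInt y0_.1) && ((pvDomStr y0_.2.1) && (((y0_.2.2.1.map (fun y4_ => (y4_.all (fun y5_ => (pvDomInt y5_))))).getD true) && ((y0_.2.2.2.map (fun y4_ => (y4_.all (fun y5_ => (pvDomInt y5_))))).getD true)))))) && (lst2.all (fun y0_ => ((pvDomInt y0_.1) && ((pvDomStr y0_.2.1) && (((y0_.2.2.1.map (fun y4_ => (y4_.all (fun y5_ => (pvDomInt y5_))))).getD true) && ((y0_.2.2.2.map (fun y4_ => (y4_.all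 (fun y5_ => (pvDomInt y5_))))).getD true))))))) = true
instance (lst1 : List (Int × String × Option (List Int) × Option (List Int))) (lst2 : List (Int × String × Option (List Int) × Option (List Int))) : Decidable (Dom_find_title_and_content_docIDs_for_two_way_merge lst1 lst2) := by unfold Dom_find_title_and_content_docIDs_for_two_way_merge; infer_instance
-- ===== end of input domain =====

-- B indexes lst2 by docID once and tests positional adjacency via a set, instead of A's two nested quadratic scans (objective: faster).

abbrev PvItem := Int × String × Option (List Int) × Option (List Int)

-- ===== PORT A =====
def merge_two_positional_lists (lst1 lst2 : List Int) : List Int :=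
  lst1.foldl (fun result item1 =>
    lst2.foldl (fun result item2 =>
      if item2 = item1 + 1 then result ++ [item2] else result) result) []

def filter_two_lists_by_common_docIDs (lst1 lst2 : List PvItem) : List PvItem × List PvItem :=
  lst1.foldl (fun acc item1 =>
    lst2.foldl (fun acc item2 =>
      if item1.1 = item2.1 then (acc.1 ++ [item1], acc.2 ++ [item2]) else acc) acc) ([], [])

def pvStepA (acc : List Int × List Int) (pr : PvItem × PvItem) : List Int × List Int :=
  let merged_title_lst : List Int :=
    match pr.1.2.2.1, pr.2.2.2.1 with
    | some a, some b => merge_two_positional_lists a b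
    | _, _ => []
  let merged_content_lst : List Int :=
    match pr.1.2.2.2, pr.2.2.2.2 with
    | some a, some b => merge_two_positional_lists a b
    | _, _ => []
  let acc1 := if merged_title_lst ≠ [] then (acc.1 ++ [pr.1.1], acc.2) else acc
  if merged_content_lst ≠ [] then (acc1.1, acc1.2 ++ [pr.1.1]) else acc1

def find_title_and_content_docIDs_for_two_way_merge (lst1 : List (Int × String × Option (List Int) × Option (List Int))) (lst2 : List (Int × String × Option (List Int) × Option (List Int))) : List (List Int) :=
  let filtered_lists := filter_two_lists_by_common_docIDs lst1 lst2
  let modified_lst1 := filtered_lists.1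
  let modified_lst2 := filtered_lists.2
  let r := (modified_lst1.zip modified_lst2).foldl pvStepA ([], [])
  [r.1, r.2]

-- ===== PORT B =====
-- any(p + 1 in positions for p in pos1), positions a Python set
def pvAdj (pos1 : List Int) (positions : PySem.Set Int) : Bool :=
  pos1.any (fun p => positions.contains (p + 1))

def pvStepB (i1 : PvItem) (acc : List Int × List Int) (i2 : PvItem) : List Int × List Int :=
  let acc1 :=
    match i1.2.2.1, i2.2.2.1 with
    | some a, some b => if pvAdj a (PySem.Set.ofList b) then (acc.1 ++ [i1.1], acc.2) else acc
    | _, _ => acc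
  match i1.2.2.2, i2.2.2.2 with
  | some a, some b => if pvAdj a (PySem.Set.ofList b) then (acc1.1, acc1.2 ++ [i1.1]) else acc1
  | _, _ => acc1

def find_title_and_content_docIDs_for_two_way_merge_alt (lst1 : List (Int × String × Option (List Int) × Option (List Int))) (lst2 : List (Int × String × Option (List Int) × Option (List Int))) : List (List Int) :=
  let index : PySem.Dict Int (List PvItem) :=
    lst2.foldl (fun d it => d.modify it.1 [] (fun l => l ++ [it])) PySem.Dict.empty
  let r := lst1.foldl (fun acc i1 =>
    (index.getD i1.1 []).foldl (pvStepB i1) acc) (([], []) : List Int × List Int)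
  [r.1, r.2]

-- ===== PRECONDITION & SPEC =====
def Spec_find_title_and_content_docIDs_for_two_way_merge (lst1 : List (Int × String × Option (List Int) × Option (List Int))) (lst2 : List (Int × String × Option (List Int) × Option (List Int))) (out : List (List Int)) : Prop := out = find_title_and_content_docIDs_for_two_way_merge_alt lst1 lst2
instance (lst1 : List (Int × String × Option (List Int) × Option (List Int))) (lst2 : List (Int × String × Option (List Int) × Option (List Int))) (out : List (List Int)) : Decidable (Spec_find_title_and_content_docIDs_for_two_way_merge lst1 lst2 out) := by unfold Spec_find_title_and_content_docIDs_for_two_way_merge; infer_instance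

-- ===== CLAIM (what is proved, stated in full; the proofs are below) =====
def Claim_equal_find_title_and_content_docIDs_for_two_way_merge : Prop := ∀ (lst1 : List (Int × String × Option (List Int) × Option (List Int))) (lst2 : List (Int × String × Option (List Int) × Option (List Int))), Dom_find_title_and_content_docIDs_for_two_way_merge lst1 lst2 → Spec_find_title_and_content_docIDs_for_two_way_merge lst1 lst2 (find_title_and_content_docIDs_for_two_way_merge lst1 lst2)

-- ===== LEMMAS AND PROOFS =====

-- A's positional merge is the flatMap of inner filters
theorem merge_eq_flatMap (l1 l2 : List Int) :
    merge_two_positional_lists l1 l2 = l1.flatMap (fun x => l2.filter (fun y => decide (y = x + 1))) := by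
  unfold merge_two_positional_lists
  have h : ∀ (acc : List Int),
      l1.foldl (fun result item1 =>
        l2.foldl (fun result item2 => if item2 = item1 + 1 then result ++ [item2] else result) result) acc
      = acc ++ l1.flatMap (fun x => l2.filter (fun y => decide (y = x + 1))) := by
    induction l1 with
    | nil => simp
    | cons x xs ih =>
      intro acc
      simp only [List.foldl_cons, List.flatMap_cons]
      rw [PySem.List.foldl_append_ite_eq_filter, ih, List.append_assoc]
  exact h []

-- nonemptiness of the merge = B's set-based existence test
theorem merge_ne_nil_iff (l1 l2 : List Int) :
    (merge_two_positional_lists l1 l2 ≠ []) ↔ pvAdj l1 (PySem.Set.ofList l2) = true := by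
  rw [merge_eq_flatMap]
  simp [pvAdj, List.flatMap_eq_nil_iff, List.filter_eq_nil_iff, List.any_eq_true,
        PySem.Set.contains, PySem.Set.mem_ofList]

-- A's filter builds the two projections of the common-pairs stream
def pvPairs (lst1 lst2 : List PvItem) : List (PvItem × PvItem) :=
  lst1.flatMap (fun i1 => (lst2.filter (fun i2 => decide (i1.1 = i2.1))).map (fun i2 => (i1, i2)))

theorem inner_filter_fold (x : PvItem) (lst2 : List PvItem) (a : List PvItem × List PvItem) :
    lst2.foldl (fun acc item2 =>
        if x.1 = item2.1 then (acc.1 ++ [x], acc.2 ++ [item2]) else acc) a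
      = (a.1 ++ ((lst2.filter (fun i2 => decide (x.1 = i2.1))).map (fun i2 => ((x : PvItem), i2))).map Prod.fst,
         a.2 ++ ((lst2.filter (fun i2 => decide (x.1 = i2.1))).map (fun i2 => ((x : PvItem), i2))).map Prod.snd) := by
  induction lst2 generalizing a with
  | nil => simp
  | cons y ys ih =>
    simp only [List.foldl_cons]
    by_cases hxy : x.1 = y.1
    · rw [if_pos hxy, ih]; simp [hxy]
    · rw [if_neg hxy, ih]; simp [hxy]

theorem filter_eq_pairs (lst1 lst2 : List PvItem) :
    filter_two_lists_by_common_docIDs lst1 lst2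
      = ((pvPairs lst1 lst2).map Prod.fst, (pvPairs lst1 lst2).map Prod.snd) := by
  unfold filter_two_lists_by_common_docIDs pvPairs
  have h : ∀ (acc : List PvItem × List PvItem),
      lst1.foldl (fun acc item1 =>
        lst2.foldl (fun acc item2 =>
          if item1.1 = item2.1 then (acc.1 ++ [item1], acc.2 ++ [item2]) else acc) acc) acc
      = (acc.1 ++ (lst1.flatMap (fun i1 => (lst2.filter (fun i2 => decide (i1.1 = i2.1))).map (fun i2 => (i1, i2)))).map Prod.fst,
         acc.2 ++ (lst1.flatMap (fun i1 => (lst2.filter (fun i2 => decide (i1.1 = i2.1))).map (fun i2 => (i1, i2)))).map Prod.snd) := by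
    induction lst1 with
    | nil => simp
    | cons x xs ih =>
      intro acc
      simp only [List.foldl_cons, List.flatMap_cons]
      rw [inner_filter_fold, ih]
      simp [List.append_assoc]
  rw [h ([], [])]; simp

-- the two steps agree on every pair
theorem step_eq (acc : List Int × List Int) (i1 i2 : PvItem) :
    pvStepA acc (i1, i2) = pvStepB i1 acc i2 := by
  rcases i1 with ⟨d1, s1, t1, c1⟩
  rcases i2 with ⟨d2, s2, t2, c2⟩
  cases t1 <;> cases t2 <;> cases c1 <;> cases c2 <;>
    simp [pvStepA, pvStepB, merge_ne_nil_iff]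

-- the grouping dict returns exactly the inner filter of A's pairing
theorem index_getD (lst2 : List PvItem) (k : Int) :
    (lst2.foldl (fun d it => d.modify it.1 [] (fun l => l ++ [it]))
        (PySem.Dict.empty : PySem.Dict Int (List PvItem))).getD k []
      = lst2.filter (fun i2 => decide (k = i2.1)) := by
  have h := PySem.Dict.getD_foldl_modify_append
      (l := lst2.map (fun it => (it.1, it))) (d := (PySem.Dict.empty : PySem.Dict Int (List PvItem))) (c := k)
  rw [List.foldl_map] at h
  simp only [PySem.Dict.getD_empty, List.nil_append] at h
  rw [h, List.filter_map, List.map_map]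
  have hpred : List.filter ((fun p => p.1 == k) ∘ (fun it => ((it : PvItem).1, it))) lst2
      = List.filter (fun i2 => decide (k = i2.1)) lst2 := by
    apply List.filter_congr
    intro x _
    by_cases hx : x.1 = k
    · simp [hx]
    · simp [hx, Ne.symm hx]
  rw [hpred]
  simp [Function.comp_def]

-- folding A's step over the pair stream = B's nested fold
theorem foldl_pairs (lst1 lst2 : List PvItem) (acc : List Int × List Int) :
    (pvPairs lst1 lst2).foldl pvStepA acc
      = lst1.foldl (fun acc i1 =>
          (lst2.filter (fun i2 => decide (i1.1 = i2.1))).foldl (pvStepB i1) acc) acc := by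
  induction lst1 generalizing acc with
  | nil => simp [pvPairs]
  | cons x xs ih =>
    simp only [pvPairs, List.flatMap_cons, List.foldl_append, List.foldl_cons, List.foldl_map]
    rw [← pvPairs, ih]
    congr 1
    apply PySem.List.foldl_congr_mem
    intro a b _
    exact step_eq a x b

-- ===== VERDICT (by name: the statement is the Claim_ definition above) =====
theorem find_title_and_content_docIDs_for_two_way_merge_spec : Claim_equal_find_title_and_content_docIDs_for_two_way_merge := by
  intro lst1 lst2 _
  unfold Spec_find_title_and_content_docIDs_for_two_way_merge
  unfold find_title_and_content_docIDs_for_two_way_merge find_title_and_content_docIDs_for_two_way_merge_alt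
  simp only [filter_eq_pairs, List.zip_map']
  simp only [List.map_id']
  rw [foldl_pairs]
  have hfold := PySem.List.foldl_congr_mem lst1
      (fun acc i1 => (lst2.filter (fun i2 => decide (i1.1 = i2.1))).foldl (pvStepB i1) acc)
      (fun acc i1 => ((lst2.foldl (fun d it => d.modify it.1 [] (fun l => l ++ [it]))
          (PySem.Dict.empty : PySem.Dict Int (List PvItem))).getD i1.1 []).foldl (pvStepB i1) acc)
      (([], []) : List Int × List Int)
      (by intro acc i1 _; dsimp only; rw [index_getD])
  rw [hfold]
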